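-- pv_equiv track=rewrite | github.com/anmoanmo/acm_exercises | lanqiao/2022A/矩阵拼接.py | check4
-- ===== SOURCE A (Python) =====
-- def check4(a, b, c):
--     for i in a:
--         for j in b:
--             for k in c:
--                 if i == j == k:
--                     return True
--                 if i == j and a[0] + a[1] + b[0] + b[1] - i - j == k:
--                     return True
--                 if i == k and a[0] + a[1] + c[0] + c[1] - i - k == j:
--                     return True
--                 if k == j and b[0] + b[1] + c[0] + c[1] - k - j == i:
--                     return True
-- ===== SOURCE B (Python) =====
-- def check4(a, b, c):
--     # Set-based reformulation: a match exists iff the three sets share a value,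
--     # or some shared pair value v makes the complementary sum land in the third set.
--     sA, sB, sC = set(a), set(b), set(c)
--     if sA & sB & sC:
--         return True
--     ab = sA & sB
--     if ab:
--         s = a[0] + a[1] + b[0] + b[1]
--         if any(s - 2 * v in sC for v in ab):
--             return True
--     ac = sA & sC
--     if ac:
--         s = a[0] + a[1] + c[0] + c[1]
--         if any(s - 2 * v in sB for v in ac):
--             return True
--     bc = sB & sC
--     if bc:
--         s = b[0] + b[1] + c[0] + c[1]
--         if any(s - 2 * v in sA for v in bc):
--             return True
-- ===== Notes on version B (the rewrite author's own statement) =====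
-- stated objective: alternative
-- what changed: Replaces A's triple nested scan over all (i,j,k) with set intersections: build set(a),set(b),set(c) once, test the three-way intersection, then for each pairwise intersection test whether the complementary pair-sum value lies in the third set.
-- outside the precondition, e.g. on check4([1], [5, 1], [5, 0]): A returns True, B raises IndexError
import Mathlib
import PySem

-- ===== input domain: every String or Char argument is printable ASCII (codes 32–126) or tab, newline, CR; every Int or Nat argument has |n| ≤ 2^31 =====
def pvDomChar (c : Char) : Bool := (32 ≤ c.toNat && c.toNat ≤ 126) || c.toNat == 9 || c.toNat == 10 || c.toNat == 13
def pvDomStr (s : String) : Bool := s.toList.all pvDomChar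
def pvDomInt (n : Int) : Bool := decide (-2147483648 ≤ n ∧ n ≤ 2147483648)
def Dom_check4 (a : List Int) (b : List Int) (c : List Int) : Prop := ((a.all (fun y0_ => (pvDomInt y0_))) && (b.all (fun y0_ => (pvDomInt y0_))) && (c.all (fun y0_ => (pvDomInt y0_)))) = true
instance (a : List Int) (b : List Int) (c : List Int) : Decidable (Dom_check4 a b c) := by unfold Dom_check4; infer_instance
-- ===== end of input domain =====

-- B replaces A's triple nested scan by set intersections plus one complementary-sum membership test per pair of sets (alternative algorithm); equivalence proved on Pre_ (lists empty or of length ≥ 2).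


-- ===== PORT A =====
-- total indexing helper: xs[n]; exact whenever the index is in range, which Pre_ guarantees
-- at every point where either Python evaluates it
def pyAt (xs : List Int) (n : Int) : Int := (PySem.List.pyGet? xs n).getD 0

-- innermost 'for k in c' with the four early returns
def check4LoopC (a b c : List Int) (i j : Int) : List Int → Option Bool
  | [] => none
  | k :: ks =>
    if i = j ∧ j = k then some true
    else if i = j ∧ pyAt a 0 + pyAt a 1 + pyAt b 0 + pyAt b 1 - i - j = k then some true
    else if i = k ∧ pyAt a 0 + pyAt a 1 + pyAt c 0 + pyAt c 1 - i - k = j then some true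
    else if k = j ∧ pyAt b 0 + pyAt b 1 + pyAt c 0 + pyAt c 1 - k - j = i then some true
    else check4LoopC a b c i j ks

-- 'for j in b'
def check4LoopB (a b c : List Int) (i : Int) : List Int → Option Bool
  | [] => none
  | j :: js =>
    match check4LoopC a b c i j c with
    | some r => some r
    | none => check4LoopB a b c i js

-- 'for i in a'
def check4LoopA (a b c : List Int) : List Int → Option Bool
  | [] => none
  | i :: is =>
    match check4LoopB a b c i b with
    | some r => some r
    | none => check4LoopA a b c is

def check4 (a : List Int) (b : List Int) (c : List Int) : Option Bool :=
  check4LoopA a b c a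

-- ===== PORT B =====
def check4_alt (a : List Int) (b : List Int) (c : List Int) : Option Bool :=
  let sA : PySem.Set Int := PySem.Set.ofList a
  let sB : PySem.Set Int := PySem.Set.ofList b
  let sC : PySem.Set Int := PySem.Set.ofList c
  if PySem.Set.inter (PySem.Set.inter sA sB) sC ≠ ([] : List Int) then some true
  else
    let ab := PySem.Set.inter sA sB
    if ab ≠ ([] : List Int) ∧
        ab.any (fun v => PySem.Set.contains sC (pyAt a 0 + pyAt a 1 + pyAt b 0 + pyAt b 1 - 2 * v)) then some true
    else
      let ac := PySem.Set.inter sA sC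
      if ac ≠ ([] : List Int) ∧
          ac.any (fun v => PySem.Set.contains sB (pyAt a 0 + pyAt a 1 + pyAt c 0 + pyAt c 1 - 2 * v)) then some true
      else
        let bc := PySem.Set.inter sB sC
        if bc ≠ ([] : List Int) ∧
            bc.any (fun v => PySem.Set.contains sA (pyAt b 0 + pyAt b 1 + pyAt c 0 + pyAt c 1 - 2 * v)) then some true
        else none

-- ===== PRECONDITION & SPEC =====
-- Pre_ excludes lists of exactly one element: there the index expression x[1] can raise
-- IndexError — A reaches it lazily (so on some such inputs A still returns a value) while
-- B computes the pair sums as soon as the corresponding sets intersect and may raise instead.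
def Pre_check4 (a : List Int) (b : List Int) (c : List Int) : Prop :=
  (a = [] ∨ 2 ≤ a.length) ∧ (b = [] ∨ 2 ≤ b.length) ∧ (c = [] ∨ 2 ≤ c.length)
instance (a : List Int) (b : List Int) (c : List Int) : Decidable (Pre_check4 a b c) := by
  unfold Pre_check4; infer_instance

def pvWitness_check4 : List Int × List Int × List Int := ([1, 2], [3, 4], [5, 6])

def Spec_check4 (a : List Int) (b : List Int) (c : List Int) (out : Option Bool) : Prop := out = check4_alt a b c
instance (a : List Int) (b : List Int) (c : List Int) (out : Option Bool) : Decidable (Spec_check4 a b c out) := by unfold Spec_check4; infer_instance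

-- ===== CLAIM (what is proved, stated in full; the proofs are below) =====
def Claim_equal_check4 : Prop := ∀ (a : List Int) (b : List Int) (c : List Int), Dom_check4 a b c → Pre_check4 a b c → Spec_check4 a b c (check4 a b c)

-- ===== LEMMAS AND PROOFS =====

-- the success condition of A's innermost body, for a fixed triple (i, j, k)
abbrev Cond (a b c : List Int) (i j k : Int) : Prop :=
  (i = j ∧ j = k) ∨
  (i = j ∧ pyAt a 0 + pyAt a 1 + pyAt b 0 + pyAt b 1 - i - j = k) ∨
  (i = k ∧ pyAt a 0 + pyAt a 1 + pyAt c 0 + pyAt c 1 - i - k = j) ∨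
  (k = j ∧ pyAt b 0 + pyAt b 1 + pyAt c 0 + pyAt c 1 - k - j = i)

theorem loopC_step (a b c : List Int) (i j k : Int) (ks : List Int) :
    check4LoopC a b c i j (k :: ks) =
      if Cond a b c i j k then some true else check4LoopC a b c i j ks := by
  rw [check4LoopC]
  by_cases h1 : i = j ∧ j = k
  · rw [if_pos h1, if_pos (Or.inl h1)]
  · rw [if_neg h1]
    by_cases h2 : i = j ∧ pyAt a 0 + pyAt a 1 + pyAt b 0 + pyAt b 1 - i - j = k
    · rw [if_pos h2, if_pos (Or.inr (Or.inl h2))]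
    · rw [if_neg h2]
      by_cases h3 : i = k ∧ pyAt a 0 + pyAt a 1 + pyAt c 0 + pyAt c 1 - i - k = j
      · rw [if_pos h3, if_pos (Or.inr (Or.inr (Or.inl h3)))]
      · rw [if_neg h3]
        by_cases h4 : k = j ∧ pyAt b 0 + pyAt b 1 + pyAt c 0 + pyAt c 1 - k - j = i
        · rw [if_pos h4, if_pos (Or.inr (Or.inr (Or.inr h4)))]
        · rw [if_neg h4, if_neg (by tauto : ¬ Cond a b c i j k)]

theorem loopC_eq (a b c : List Int) (i j : Int) (ks : List Int) :
    check4LoopC a b c i j ks = if ∃ k ∈ ks, Cond a b c i j k then some true else none := by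
  induction ks with
  | nil => simp [check4LoopC]
  | cons k ks ih =>
    rw [loopC_step, ih]
    by_cases h : Cond a b c i j k <;> simp [h]

theorem loopB_eq (a b c : List Int) (i : Int) (js : List Int) :
    check4LoopB a b c i js = if ∃ j ∈ js, ∃ k ∈ c, Cond a b c i j k then some true else none := by
  induction js with
  | nil => simp [check4LoopB]
  | cons j js ih =>
    rw [check4LoopB, ih, loopC_eq]
    by_cases h : ∃ k ∈ c, Cond a b c i j k <;> simp [h]

theorem loopA_eq (a b c : List Int) (is : List Int) :
    check4LoopA a b c is = if ∃ i ∈ is, ∃ j ∈ b, ∃ k ∈ c, Cond a b c i j k then some true else none := by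
  induction is with
  | nil => simp [check4LoopA]
  | cons i is ih =>
    rw [check4LoopA, ih, loopB_eq]
    by_cases h : ∃ j ∈ b, ∃ k ∈ c, Cond a b c i j k <;> simp [h]

-- B's overall success condition
abbrev CondB (a b c : List Int) : Prop :=
  (∃ v ∈ a, v ∈ b ∧ v ∈ c) ∨
  (∃ v ∈ a, v ∈ b ∧ pyAt a 0 + pyAt a 1 + pyAt b 0 + pyAt b 1 - 2 * v ∈ c) ∨
  (∃ v ∈ a, v ∈ c ∧ pyAt a 0 + pyAt a 1 + pyAt c 0 + pyAt c 1 - 2 * v ∈ b) ∨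
  (∃ v ∈ b, v ∈ c ∧ pyAt b 0 + pyAt b 1 + pyAt c 0 + pyAt c 1 - 2 * v ∈ a)

theorem ne_nil_iff_exists_mem {α : Type} (l : List α) : l ≠ [] ↔ ∃ x, x ∈ l := by
  cases l <;> simp

-- the three-way intersection is nonempty iff the three lists share a value
theorem inter3_ne_iff (s t u : List Int) :
    PySem.Set.inter (PySem.Set.inter (PySem.Set.ofList s) (PySem.Set.ofList t)) (PySem.Set.ofList u) ≠ ([] : List Int)
      ↔ ∃ v ∈ s, v ∈ t ∧ v ∈ u := by
  rw [ne_nil_iff_exists_mem]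
  constructor
  · rintro ⟨v, hv⟩
    rw [PySem.Set.mem_inter, PySem.Set.mem_inter, PySem.Set.mem_ofList, PySem.Set.mem_ofList,
      PySem.Set.mem_ofList] at hv
    exact ⟨v, hv.1.1, hv.1.2, hv.2⟩
  · rintro ⟨v, h1, h2, h3⟩
    refine ⟨v, ?_⟩
    rw [PySem.Set.mem_inter, PySem.Set.mem_inter, PySem.Set.mem_ofList, PySem.Set.mem_ofList,
      PySem.Set.mem_ofList]
    exact ⟨⟨h1, h2⟩, h3⟩

-- 'if sX & sY: … any(f(v) in sZ for v in sX & sY)' iff some shared v of s,t sends f v into u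
theorem guard_any_iff (s t u : List Int) (f : Int → Int) :
    (PySem.Set.inter (PySem.Set.ofList s) (PySem.Set.ofList t) ≠ ([] : List Int) ∧
      (PySem.Set.inter (PySem.Set.ofList s) (PySem.Set.ofList t)).any
        (fun v => PySem.Set.contains (PySem.Set.ofList u) (f v)) = true)
      ↔ ∃ v ∈ s, v ∈ t ∧ f v ∈ u := by
  constructor
  · rintro ⟨-, h⟩
    obtain ⟨v, hv, hf⟩ := List.any_eq_true.mp h
    rw [PySem.Set.mem_inter, PySem.Set.mem_ofList, PySem.Set.mem_ofList] at hv
    rw [PySem.Set.contains_iff, PySem.Set.mem_ofList] at hf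
    exact ⟨v, hv.1, hv.2, hf⟩
  · rintro ⟨v, h1, h2, h3⟩
    have hv : v ∈ PySem.Set.inter (PySem.Set.ofList s) (PySem.Set.ofList t) := by
      rw [PySem.Set.mem_inter, PySem.Set.mem_ofList, PySem.Set.mem_ofList]
      exact ⟨h1, h2⟩
    refine ⟨(ne_nil_iff_exists_mem _).mpr ⟨v, hv⟩, List.any_eq_true.mpr ⟨v, hv, ?_⟩⟩
    rw [PySem.Set.contains_iff, PySem.Set.mem_ofList]
    exact h3

-- an if-chain returning the same value collapses to the disjunction of its conditions
theorem if_chain4 {α : Type} (p q r s : Prop) [Decidable p] [Decidable q] [Decidable r]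
    [Decidable s] (x y : α) :
    (if p then x else if q then x else if r then x else if s then x else y) =
      if p ∨ q ∨ r ∨ s then x else y := by
  split_ifs <;> tauto

theorem alt_eq (a b c : List Int) :
    check4_alt a b c = if CondB a b c then some true else none := by
  simp only [check4_alt, inter3_ne_iff, guard_any_iff]
  exact if_chain4 _ _ _ _ _ _

theorem cond_iff (a b c : List Int) :
    (∃ i ∈ a, ∃ j ∈ b, ∃ k ∈ c, Cond a b c i j k) ↔ CondB a b c := by
  constructor
  · rintro ⟨i, hi, j, hj, k, hk, h⟩
    rcases h with ⟨h1, h2⟩ | ⟨h1, h2⟩ | ⟨h1, h2⟩ | ⟨h1, h2⟩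
    · exact Or.inl ⟨i, hi, h1 ▸ hj, (h1.trans h2) ▸ hk⟩
    · refine Or.inr (Or.inl ⟨i, hi, h1 ▸ hj, ?_⟩)
      have : pyAt a 0 + pyAt a 1 + pyAt b 0 + pyAt b 1 - 2 * i = k := by omega
      exact this ▸ hk
    · refine Or.inr (Or.inr (Or.inl ⟨i, hi, h1 ▸ hk, ?_⟩))
      have : pyAt a 0 + pyAt a 1 + pyAt c 0 + pyAt c 1 - 2 * i = j := by omega
      exact this ▸ hj
    · refine Or.inr (Or.inr (Or.inr ⟨k, h1 ▸ hj, hk, ?_⟩))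
      have : pyAt b 0 + pyAt b 1 + pyAt c 0 + pyAt c 1 - 2 * k = i := by omega
      exact this ▸ hi
  · rintro (⟨v, hv1, hv2, hv3⟩ | ⟨v, hv1, hv2, hv3⟩ | ⟨v, hv1, hv2, hv3⟩ | ⟨v, hv1, hv2, hv3⟩)
    · exact ⟨v, hv1, v, hv2, v, hv3, Or.inl ⟨rfl, rfl⟩⟩
    · exact ⟨v, hv1, v, hv2, _, hv3, Or.inr (Or.inl ⟨rfl, by ring⟩)⟩
    · exact ⟨v, hv1, _, hv3, v, hv2, Or.inr (Or.inr (Or.inl ⟨rfl, by ring⟩))⟩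
    · exact ⟨_, hv3, v, hv1, v, hv2, Or.inr (Or.inr (Or.inr ⟨rfl, by ring⟩))⟩

-- ===== VERDICT (by name: the statement is the Claim_ definition above) =====
theorem check4_spec : Claim_equal_check4 := by
  intro a b c _ _
  unfold Spec_check4 check4
  rw [loopA_eq, alt_eq]
  by_cases h : CondB a b c
  · rw [if_pos ((cond_iff a b c).mpr h), if_pos h]
  · rw [if_neg (fun hh => h ((cond_iff a b c).mp hh)), if_neg h]
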